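-- pv_equiv track=rewrite | github.com/mohammed-ks02/exercices_aba | jour6/q1.py | solution
-- ===== SOURCE A (Python) =====
-- def solution(a):
--     n = len(a)
--     b = [0] * n
--     for i in range(n):
--         gauche = a[i-1] if i > 0 else 0
--         centre = a[i]
--         droite = a[i+1] if i < n-1 else 0
--         b[i] = gauche + centre + droite
--     return b
-- ===== SOURCE B (Python) =====
-- def solution(a):
--     n = len(a)
--     # prefix sums: p[k] = a[0] + ... + a[k-1]
--     p = [0] * (n + 1)
--     for i in range(n):
--         p[i + 1] = p[i] + a[i]
--     # each output is a window sum expressed as a difference of two prefix entries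
--     return [p[min(i + 2, n)] - p[max(i - 1, 0)] for i in range(n)]
-- ===== Notes on version B (the rewrite author's own statement) =====
-- stated objective: alternative
-- what changed: B first builds a prefix-sum array in one pass and then computes each output as a difference of two clamped prefix entries p[min(i+2,n)]-p[max(i-1,0)], instead of A's per-index loop that reads the three neighbors with boundary conditionals.
import Mathlib
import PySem

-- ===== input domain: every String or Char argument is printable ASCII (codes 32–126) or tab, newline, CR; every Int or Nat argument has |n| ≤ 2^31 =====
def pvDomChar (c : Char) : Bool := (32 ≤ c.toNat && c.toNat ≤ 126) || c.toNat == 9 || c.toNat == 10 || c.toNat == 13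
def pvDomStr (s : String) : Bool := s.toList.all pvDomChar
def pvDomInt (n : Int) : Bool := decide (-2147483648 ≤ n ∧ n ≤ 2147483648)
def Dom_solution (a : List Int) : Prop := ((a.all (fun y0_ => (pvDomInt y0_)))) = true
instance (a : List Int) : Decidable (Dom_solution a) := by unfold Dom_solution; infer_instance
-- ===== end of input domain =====

-- B builds a prefix-sum array once and returns each window sum as a difference of
-- two clamped prefix entries, instead of A's per-index loop with boundary conditionals.

-- ===== PORT A =====
def solution (a : List Int) : List Int :=
  let n : Int := a.length
  (PySem.List.pyRange 0 n 1).map (fun i =>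
    (if i > 0 then PySem.List.pyGetD a (i - 1) 0 else 0)
    + PySem.List.pyGetD a i 0
    + (if i < n - 1 then PySem.List.pyGetD a (i + 1) 0 else 0))

-- ===== PORT B =====
-- the Python loop 'p[i+1] = p[i] + a[i]' building the prefix list, as structural recursion
def pvBuildPrefix : List Int → Int → List Int
  | [], _ => []
  | x :: xs, acc => (acc + x) :: pvBuildPrefix xs (acc + x)

def solution_alt (a : List Int) : List Int :=
  let n := a.length
  let p := 0 :: pvBuildPrefix a 0
  (List.range n).map (fun i => p.getD (min (i + 2) n) 0 - p.getD (i - 1) 0)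

-- ===== PRECONDITION & SPEC =====
def Spec_solution (a : List Int) (out : List Int) : Prop := out = solution_alt a
instance (a : List Int) (out : List Int) : Decidable (Spec_solution a out) := by unfold Spec_solution; infer_instance

-- ===== CLAIM (what is proved, stated in full; the proofs are below) =====
def Claim_equal_solution : Prop := ∀ (a : List Int), Dom_solution a → Spec_solution a (solution a)

-- ===== LEMMAS AND PROOFS =====

theorem buildPrefix_getD (a : List Int) (acc : Int) (k : Nat) (h : k < a.length) :
    (pvBuildPrefix a acc).getD k 0 = acc + (a.take (k + 1)).sum := by
  induction a generalizing acc k with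
  | nil => simp at h
  | cons x xs ih =>
    cases k with
    | zero => simp [pvBuildPrefix]
    | succ k =>
      simp only [pvBuildPrefix, List.getD_cons_succ, List.take_succ_cons, List.sum_cons]
      rw [ih (acc + x) k (by simpa using h)]
      ring

theorem prefix_getD (a : List Int) (k : Nat) (h : k ≤ a.length) :
    (0 :: pvBuildPrefix a 0).getD k 0 = (a.take k).sum := by
  cases k with
  | zero => simp
  | succ k =>
    simp only [List.getD_cons_succ]
    rw [buildPrefix_getD a 0 k (by omega)]
    ring

theorem take_succ_sum (a : List Int) (k : Nat) (h : k < a.length) :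
    (a.take (k + 1)).sum = (a.take k).sum + a[k] := by
  rw [List.take_add_one, List.sum_append]
  simp [List.getElem?_eq_getElem h]

-- ===== VERDICT (by name: the statement is the Claim_ definition above) =====
theorem solution_spec : Claim_equal_solution := by
  intro a _
  unfold Spec_solution solution solution_alt
  simp only
  apply List.ext_getElem
  · simp [PySem.List.length_pyRange_one]
  · intro k hk1 hk2
    have hk : k < a.length := by simpa [PySem.List.length_pyRange_one] using hk1
    rw [List.getElem_map, List.getElem_map, PySem.List.getElem_pyRange_one, List.getElem_range]
    simp only [zero_add]
    rw [prefix_getD a (min (k + 2) a.length) (by omega),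
        prefix_getD a (k - 1) (by omega)]
    have hc : PySem.List.pyGetD a (k : Int) 0 = a[k] := by
      rw [PySem.List.pyGetD_eq_getElem a 0 (by positivity) (by exact_mod_cast hk)]; simp
    have hget : ∀ (j : Nat) (hj : j < a.length), PySem.List.pyGetD a (j : Int) 0 = a[j]'hj := by
      intro j hj
      rw [PySem.List.pyGetD_eq_getElem a 0 (by positivity) (by exact_mod_cast hj)]
      simp
    by_cases h0 : k = 0
    · subst h0
      by_cases h1 : a.length = 1
      · rw [if_neg (by omega), if_neg (by omega), hc]
        rw [show min (0 + 2) a.length = 0 + 1 by omega, take_succ_sum a 0 hk]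
        simp
      · rw [if_neg (by omega), if_pos (by push_cast; omega)]
        rw [min_eq_left (by omega)]
        rw [take_succ_sum a 1 (by omega), take_succ_sum a 0 hk]
        rw [hc]
        rw [show ((0 : Nat) : Int) + 1 = ((1 : Nat) : Int) by simp, hget 1 (by omega)]
        simp
    · have hk1' : 1 ≤ k := by omega
      rw [if_pos (by exact_mod_cast Nat.pos_of_ne_zero h0), hc]
      rw [show ((k : Nat) : Int) - 1 = (((k - 1 : Nat)) : Int) by push_cast [hk1']; ring,
          hget (k - 1) (by omega)]
      have hs1 : (a.take k).sum = (a.take (k - 1)).sum + a[k - 1]'(by omega) := by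
        conv_lhs => rw [show k = (k - 1) + 1 by omega]
        exact take_succ_sum a (k - 1) (by omega)
      by_cases h2 : k + 1 < a.length
      · rw [if_pos (by omega)]
        rw [show ((k : Nat) : Int) + 1 = (((k + 1 : Nat)) : Int) by push_cast; ring,
            hget (k + 1) h2]
        rw [min_eq_left (by omega)]
        rw [take_succ_sum a (k + 1) (by omega), take_succ_sum a k hk, hs1]
        ring
      · rw [if_neg (by omega)]
        rw [min_eq_right (by omega)]
        have hlen : (a.take a.length).sum = (a.take (k + 1)).sum := by
          rw [show a.length = k + 1 by omega]
        rw [hlen, take_succ_sum a k hk, hs1]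
        ring
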